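-- pv_equiv track=rewrite | github.com/dawidbuler-bit/Python | algorytmy_na_ciągach_liczbowych_cz1.py | znajdz_minimum
-- ===== SOURCE A (Python) =====
-- def znajdz_minimum(ciag):
--     porownania = 0
--     minimum = ciag[0]
--     for liczba in ciag[1:]:
--         porownania += 1
--         if liczba < minimum:
--             minimum = liczba
--     return minimum, porownania
-- ===== SOURCE B (Python) =====
-- def znajdz_minimum(ciag):
--     return sorted(ciag)[0], len(ciag) - 1
-- ===== Notes on version B (the rewrite author's own statement) =====
-- stated objective: alternative
-- what changed: Replaces the scan-with-counter loop by sorting the list and taking its first element, with the comparison count given by the closed form len(ciag)-1.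
import Mathlib
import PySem

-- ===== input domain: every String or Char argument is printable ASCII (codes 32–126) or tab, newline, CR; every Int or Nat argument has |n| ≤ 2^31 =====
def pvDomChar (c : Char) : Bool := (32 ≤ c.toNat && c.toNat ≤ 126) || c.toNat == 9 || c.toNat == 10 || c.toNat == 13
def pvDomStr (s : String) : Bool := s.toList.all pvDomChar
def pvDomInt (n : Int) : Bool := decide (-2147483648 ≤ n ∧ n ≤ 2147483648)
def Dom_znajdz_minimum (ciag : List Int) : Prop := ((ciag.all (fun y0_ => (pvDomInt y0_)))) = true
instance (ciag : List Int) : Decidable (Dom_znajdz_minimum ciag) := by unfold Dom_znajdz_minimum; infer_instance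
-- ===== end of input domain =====

-- B replaces A's scan-with-counter loop by sorting and taking the first element, count = len-1 (alternative algorithm).

-- ===== PORT A =====
def znajdz_minimum (ciag : List Int) : Int × Int :=
  let minimum := (PySem.List.pyGet? ciag 0).getD 0   -- ciag[0]; Pre_ guarantees it exists
  (PySem.List.slice ciag (some 1) none).foldl
    (fun (s : Int × Int) liczba =>
      (if liczba < s.1 then liczba else s.1, s.2 + 1)) (minimum, 0)

-- ===== PORT B =====
def znajdz_minimum_alt (ciag : List Int) : Int × Int :=
  ((PySem.List.pyGet? (PySem.List.sorted ciag (fun x => x) false) 0).getD 0,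
   (ciag.length : Int) - 1)

-- ===== PRECONDITION & SPEC =====
-- Pre_ excludes only the empty list, on which both A and B raise IndexError.
def Pre_znajdz_minimum (ciag : List Int) : Prop := ciag ≠ []
instance (ciag : List Int) : Decidable (Pre_znajdz_minimum ciag) := by unfold Pre_znajdz_minimum; infer_instance
def pvWitness_znajdz_minimum : List Int := [3, 1, 2]
def Spec_znajdz_minimum (ciag : List Int) (out : Int × Int) : Prop := out = znajdz_minimum_alt ciag
instance (ciag : List Int) (out : Int × Int) : Decidable (Spec_znajdz_minimum ciag out) := by unfold Spec_znajdz_minimum; infer_instance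

-- ===== CLAIM =====
def Claim_equal_znajdz_minimum : Prop := ∀ (ciag : List Int), Dom_znajdz_minimum ciag → Pre_znajdz_minimum ciag → Spec_znajdz_minimum ciag (znajdz_minimum ciag)

-- ===== LEMMAS AND PROOFS =====
lemma foldA_eq (xs : List Int) (m c : Int) :
    xs.foldl (fun (s : Int × Int) liczba =>
      (if liczba < s.1 then liczba else s.1, s.2 + 1)) (m, c)
    = (xs.foldl min m, c + xs.length) := by
  induction xs generalizing m c with
  | nil => simp
  | cons x t ih =>
    simp only [List.foldl_cons, ih]
    have h : (if x < m then x else m) = min m x := by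
      rw [Int.min_def]; split_ifs <;> omega
    rw [h]
    refine Prod.ext rfl ?_
    push_cast [List.length_cons]; ring

lemma head_sorted_eq_foldl_min (x : Int) (xs : List Int) :
    (PySem.List.pyGet? (PySem.List.sorted (x :: xs) (fun y => y) false) 0).getD 0
      = xs.foldl min x := by
  obtain ⟨m, t, hs⟩ : ∃ m t, PySem.List.sorted (x :: xs) (fun y => y) false = m :: t := by
    cases h : PySem.List.sorted (x :: xs) (fun y => y) false with
    | nil => exact absurd ((PySem.List.sorted_eq_nil_iff _ _ _).mp h) (by simp)
    | cons m t => exact ⟨m, t, rfl⟩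
  have hmem : m ∈ x :: xs := by
    have := PySem.List.sorted_perm (x :: xs) (fun y => y) false
    rw [hs] at this
    exact this.mem_iff.mp (by simp)
  have hle : ∀ y ∈ x :: xs, m ≤ y := PySem.List.key_head_sorted_le _ _ hs
  have hmin : PySem.List.min? (x :: xs) (fun y => y) = some (xs.foldl min x) :=
    PySem.List.min?_id_cons x xs
  have hMmem : xs.foldl min x ∈ x :: xs := PySem.List.min?_mem hmin
  have hMle : ∀ y ∈ x :: xs, xs.foldl min x ≤ y := PySem.List.min?_isMin hmin
  rw [hs]
  simp only [PySem.List.pyGet?, PySem.List.pyIdx?]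
  simp
  exact le_antisymm (hle _ hMmem) (hMle _ hmem)

-- ===== VERDICT =====
theorem znajdz_minimum_spec : Claim_equal_znajdz_minimum := by
  intro ciag _ hpre
  cases ciag with
  | nil => exact absurd rfl hpre
  | cons x xs =>
    unfold Spec_znajdz_minimum znajdz_minimum znajdz_minimum_alt
    rw [PySem.List.slice_from_one, head_sorted_eq_foldl_min]
    simp only [List.tail_cons, foldA_eq, PySem.List.pyGet?, PySem.List.pyIdx?]
    refine Prod.ext (by simp) (by simp)
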